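-- pv_equiv track=rewrite | github.com/timfennis/advent-of-code-2022 | python/day19/day19-optimized.py | minutes_needed
-- ===== SOURCE A (Python) =====
-- def add(resource_count, robot_count):
--     return tuple([ a + b for (a, b) in zip(resource_count, robot_count)])
--
-- def is_positive(b):
--     return all([a >= 0 for a in b])
--
-- def minutes_needed(resources, robots, target):
--     time = 0
--     r = resources
--     while not is_positive(add(r, target)):
--         r = add(r, robots)
--         time += 1
--         if time >= 30:
--             return None
--
--     return time
-- ===== SOURCE B (Python) =====
-- def minutes_needed(resources, robots, target):
--     # Closed form: each component's satisfied times form an interval; intersect them.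
--     if all(a + b >= 0 for a, b in zip(resources, target)):
--         return 0
--     lo, hi = 1, None  # hi None means unbounded above
--     for res, rob, tgt in zip(resources, robots, target):
--         have = res + tgt
--         if rob > 0:
--             if have < 0:
--                 lo = max(lo, -(have // rob))  # ceil((-have)/rob)
--         elif rob == 0:
--             if have < 0:
--                 return None
--         else:
--             h = have // (-rob)
--             hi = h if hi is None else min(hi, h)
--     if lo < 30 and (hi is None or lo <= hi):
--         return lo
--     return None
-- ===== Notes on version B (the rewrite author's own statement) =====
-- stated objective: faster
-- what changed: Replaces A's minute-by-minute simulation (up to 30 passes, each rebuilding the resource tuple and re-checking all components) with a single pass: each component's satisfied times form an integer interval obtained by floor/ceiling division, B intersects these intervals and returns the smallest admissible time under the 30-minute cap.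
import Mathlib
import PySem

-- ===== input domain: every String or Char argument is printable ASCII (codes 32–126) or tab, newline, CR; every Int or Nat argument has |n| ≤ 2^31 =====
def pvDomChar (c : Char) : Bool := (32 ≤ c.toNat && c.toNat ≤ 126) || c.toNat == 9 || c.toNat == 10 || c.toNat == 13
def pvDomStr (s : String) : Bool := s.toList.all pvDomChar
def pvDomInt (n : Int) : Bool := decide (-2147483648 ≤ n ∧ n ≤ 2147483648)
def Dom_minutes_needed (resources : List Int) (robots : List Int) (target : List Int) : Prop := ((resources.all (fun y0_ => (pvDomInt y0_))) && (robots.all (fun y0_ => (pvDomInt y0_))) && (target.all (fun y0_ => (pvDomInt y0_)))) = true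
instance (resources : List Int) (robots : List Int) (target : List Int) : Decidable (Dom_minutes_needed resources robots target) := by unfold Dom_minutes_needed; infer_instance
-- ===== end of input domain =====

-- B replaces A's minute-by-minute simulation by a closed form: each component's
-- satisfied times form an integer interval, so B intersects the intervals and
-- returns the smallest admissible time (objective: alternative/faster algorithm).

-- ===== PORT A =====
def pvAdd (resource_count robot_count : List Int) : List Int :=
  (List.zip resource_count robot_count).map (fun p => p.1 + p.2)

def pvIsPositive (b : List Int) : Bool :=
  (b.map (fun a => decide (a ≥ 0))).all id

-- the while loop, with fuel 30 (the loop itself returns None once time reaches 30,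
-- so fuel 30 is never exhausted before the loop's own exit)
def mnLoop (robots target : List Int) (fuel : Nat) (r : List Int) (time : Int) : Option Int :=
  if pvIsPositive (pvAdd r target) then some time
  else
    match fuel with
    | 0 => none
    | f + 1 =>
      if time + 1 ≥ 30 then none
      else mnLoop robots target f (pvAdd r robots) (time + 1)

def minutes_needed (resources : List Int) (robots : List Int) (target : List Int) : Option Int :=
  mnLoop robots target 30 resources 0

-- ===== PORT B =====
-- hi = none means "no upper bound" (Python's hi is None)
def hiOk (hi : Option Int) (t : Int) : Bool :=
  match hi with
  | none => true
  | some h => decide (t ≤ h)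

-- the for loop of Source B: accumulates (lo, hi); none = the early `return None`
def altScan : List (Int × Int × Int) → Int → Option Int → Option (Int × Option Int)
  | [], lo, hi => some (lo, hi)
  | (res, rob, tgt) :: rest, lo, hi =>
    let hv := res + tgt
    if 0 < rob then
      if hv < 0 then altScan rest (max lo (-(PySem.Int.floordiv hv rob))) hi
      else altScan rest lo hi
    else if rob = 0 then
      if hv < 0 then none else altScan rest lo hi
    else
      altScan rest lo (some (match hi with
        | none => PySem.Int.floordiv hv (-rob)
        | some v => min v (PySem.Int.floordiv hv (-rob))))

def minutes_needed_alt (resources : List Int) (robots : List Int) (target : List Int) : Option Int :=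
  if ((List.zip resources target).map (fun p => decide (p.1 + p.2 ≥ 0))).all id then some 0
  else
    match altScan (List.zip resources (List.zip robots target)) 1 none with
    | none => none
    | some (lo, hi) => if lo < 30 ∧ hiOk hi lo = true then some lo else none

-- ===== PRECONDITION & SPEC =====
def Spec_minutes_needed (resources : List Int) (robots : List Int) (target : List Int) (out : Option Int) : Prop := out = minutes_needed_alt resources robots target
instance (resources : List Int) (robots : List Int) (target : List Int) (out : Option Int) : Decidable (Spec_minutes_needed resources robots target out) := by unfold Spec_minutes_needed; infer_instance

-- ===== CLAIM (what is proved, stated in full; the proofs are below) =====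
def Claim_equal_minutes_needed : Prop := ∀ (resources : List Int) (robots : List Int) (target : List Int), Dom_minutes_needed resources robots target → Spec_minutes_needed resources robots target (minutes_needed resources robots target)

-- ===== LEMMAS AND PROOFS =====

-- all components satisfied at time t
def zAll (z : List (Int × Int × Int)) (t : Int) : Bool :=
  z.all (fun p => decide (0 ≤ p.1 + t * p.2.1 + p.2.2))

def Sat (z : List (Int × Int × Int)) (lo : Int) (hi : Option Int) (t : Int) : Prop :=
  lo ≤ t ∧ hiOk hi t = true ∧ zAll z t = true

lemma pvAdd_eq_zipWith (a b : List Int) : pvAdd a b = List.zipWith (· + ·) a b := by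
  induction a generalizing b with
  | nil => cases b <;> simp [pvAdd]
  | cons x xs ih =>
    cases b with
    | nil => simp [pvAdd]
    | cons y ys =>
      simpa [pvAdd, List.zip_cons_cons] using ih ys

lemma zipWith_step (t : Int) (as bs : List Int) :
    List.zipWith (· + ·) (List.zipWith (fun a b => a + t * b) as bs) bs =
      List.zipWith (fun a b => a + (t + 1) * b) as bs := by
  induction as generalizing bs with
  | nil => simp
  | cons x xs ih =>
    cases bs with
    | nil => simp
    | cons y ys => simp [ih]; ring

lemma zipWith_one (as bs : List Int) :
    List.zipWith (· + ·) as bs = List.zipWith (fun a b => a + 1 * b) as bs := by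
  induction as generalizing bs with
  | nil => simp
  | cons x xs ih => cases bs with
    | nil => simp
    | cons y ys => simp [ih]

lemma satA_eq_zAll (t : Int) (res rob tgt : List Int) :
    pvIsPositive (pvAdd (List.zipWith (fun a b => a + t * b) res rob) tgt) =
      zAll (List.zip res (List.zip rob tgt)) t := by
  induction res generalizing rob tgt with
  | nil => cases rob <;> cases tgt <;> simp [pvIsPositive, pvAdd, zAll]
  | cons x xs ih =>
    cases rob with
    | nil => cases tgt <;> simp [pvIsPositive, pvAdd, zAll]
    | cons y ys =>
      cases tgt with
      | nil => simp [pvIsPositive, pvAdd, zAll]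
      | cons w ws =>
        have h := ih ys ws
        simp only [pvIsPositive, pvAdd, zAll, List.zip_cons_cons, List.zipWith_cons_cons,
          List.map_cons, List.all_cons] at h ⊢
        rw [h]
        congr 1

lemma cond0_eq (res tgt : List Int) :
    pvIsPositive (pvAdd res tgt) =
      ((List.zip res tgt).map (fun p => decide (p.1 + p.2 ≥ 0))).all id := by
  simp [pvIsPositive, pvAdd, List.all_map, Function.comp_def]

-- per-component interval characterisations
lemma elt_pos (t hv rob : Int) (hrob : 0 < rob) :
    (0 ≤ hv + t * rob) ↔ (-(PySem.Int.floordiv hv rob) ≤ t) := by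
  have h := PySem.Int.le_floordiv_iff_mul_le (a := hv) (b := rob) (q := -t) hrob
  constructor
  · intro hle
    have : -t ≤ PySem.Int.floordiv hv rob := h.mpr (by nlinarith)
    omega
  · intro hle
    have : (-t) * rob ≤ hv := h.mp (by omega)
    nlinarith

lemma elt_pos_triv (t hv rob : Int) (hrob : 0 < rob) (hhv : 0 ≤ hv) (ht : 1 ≤ t) :
    0 ≤ hv + t * rob := by nlinarith

lemma elt_neg (t hv rob : Int) (hrob : rob < 0) :
    (0 ≤ hv + t * rob) ↔ (t ≤ PySem.Int.floordiv hv (-rob)) := by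
  have h := PySem.Int.le_floordiv_iff_mul_le (a := hv) (b := -rob) (q := t) (by omega)
  rw [h]
  constructor <;> intro <;> nlinarith

lemma altScan_mono (z : List (Int × Int × Int)) (lo : Int) (hi : Option Int)
    (lo' : Int) (hi' : Option Int) (h : altScan z lo hi = some (lo', hi')) : lo ≤ lo' := by
  induction z generalizing lo hi with
  | nil => simp [altScan] at h; omega
  | cons p rest ih =>
    obtain ⟨res, rob, tgt⟩ := p
    simp only [altScan] at h
    split_ifs at h
    all_goals first
      | cases h
      | (have := ih _ _ h; omega)

lemma altScan_none (z : List (Int × Int × Int)) (lo : Int) (hi : Option Int)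
    (h : altScan z lo hi = none) (t : Int) (_ht : 1 ≤ t) : ¬ Sat z lo hi t := by
  induction z generalizing lo hi with
  | nil => simp [altScan] at h
  | cons p rest ih =>
    obtain ⟨res, rob, tgt⟩ := p
    rintro ⟨h1, h2, h3⟩
    simp only [zAll, List.all_cons, Bool.and_eq_true, decide_eq_true_eq] at h3
    obtain ⟨he, hrest⟩ := h3
    have he' : 0 ≤ (res + tgt) + t * rob := by linarith
    simp only [altScan] at h
    split_ifs at h with c1 c2 c3 c4
    · -- 0 < rob, hv < 0
      have hlo : max lo (-(PySem.Int.floordiv (res + tgt) rob)) ≤ t := by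
        have := (elt_pos t (res + tgt) rob c1).mp he'
        omega
      exact ih _ _ h ⟨hlo, h2, hrest⟩
    · exact ih _ _ h ⟨h1, h2, hrest⟩
    · -- rob = 0, hv < 0: element violated
      rw [c3] at he'; omega
    · exact ih _ _ h ⟨h1, h2, hrest⟩
    · -- rob < 0: recurse with tightened hi
      have hrobneg : rob < 0 := by omega
      have hte : t ≤ PySem.Int.floordiv (res + tgt) (-rob) :=
        (elt_neg t (res + tgt) rob hrobneg).mp he'
      refine ih _ _ h ⟨h1, ?_, hrest⟩
      cases hi with
      | none => simp [hiOk, hte]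
      | some v =>
        simp only [hiOk, decide_eq_true_eq] at h2 ⊢
        omega

lemma altScan_some (z : List (Int × Int × Int)) (lo : Int) (hi : Option Int)
    (lo' : Int) (hi' : Option Int) (h : altScan z lo hi = some (lo', hi'))
    (t : Int) (_ht : 1 ≤ t) : Sat z lo hi t ↔ (lo' ≤ t ∧ hiOk hi' t = true) := by
  induction z generalizing lo hi with
  | nil =>
    simp only [altScan, Option.some.injEq, Prod.mk.injEq] at h
    obtain ⟨h1, h2⟩ := h
    subst h1; subst h2
    simp [Sat, zAll]
  | cons p rest ih =>
    obtain ⟨res, rob, tgt⟩ := p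
    simp only [altScan] at h
    have unSat : Sat ((res, rob, tgt) :: rest) lo hi t ↔
        (lo ≤ t ∧ hiOk hi t = true ∧ (0 ≤ res + t * rob + tgt) ∧ zAll rest t = true) := by
      simp [Sat, zAll]
    have harith : res + t * rob + tgt = (res + tgt) + t * rob := by ring
    by_cases c1 : 0 < rob
    · rw [if_pos c1] at h
      by_cases c2 : res + tgt < 0
      · -- 0 < rob, hv < 0
        rw [if_pos c2] at h
        rw [unSat, ← ih _ _ h]
        simp only [Sat]
        rw [harith, elt_pos t (res + tgt) rob c1]
        constructor
        · rintro ⟨a, b, c, d⟩; exact ⟨by omega, b, d⟩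
        · rintro ⟨a, b, d⟩; exact ⟨by omega, b, by omega, d⟩
      · -- 0 < rob, hv ≥ 0
        rw [if_neg c2] at h
        rw [unSat, ← ih _ _ h]
        simp only [Sat]
        have : 0 ≤ res + t * rob + tgt := by
          rw [harith]; exact elt_pos_triv t (res + tgt) rob c1 (by omega) _ht
        tauto
    · rw [if_neg c1] at h
      by_cases c3 : rob = 0
      · rw [if_pos c3] at h
        by_cases c4 : res + tgt < 0
        · rw [if_pos c4] at h; cases h
        · -- rob = 0, hv ≥ 0
          rw [if_neg c4] at h
          rw [unSat, ← ih _ _ h]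
          simp only [Sat]
          have : 0 ≤ res + t * rob + tgt := by rw [c3]; omega
          tauto
      · -- rob < 0
        rw [if_neg c3] at h
        have hrobneg : rob < 0 := by omega
        rw [unSat, ← ih _ _ h]
        simp only [Sat]
        rw [harith, elt_neg t (res + tgt) rob hrobneg]
        cases hi with
        | none =>
          simp only [hiOk, decide_eq_true_eq]
          tauto
        | some v =>
          simp only [hiOk, decide_eq_true_eq, le_min_iff]
          constructor
          · rintro ⟨a, b, c, d⟩; exact ⟨a, ⟨b, c⟩, d⟩
          · rintro ⟨a, ⟨b, c⟩, d⟩; exact ⟨a, b, c, d⟩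

-- the loop, when no time can ever satisfy the condition
lemma loop_none (res rob tgt : List Int)
    (h : altScan (List.zip res (List.zip rob tgt)) 1 none = none)
    (fuel : Nat) (t : Int) (ht : 1 ≤ t) (hft : t + fuel = 30) :
    mnLoop rob tgt fuel (List.zipWith (fun a b => a + t * b) res rob) t = none := by
  induction fuel generalizing t with
  | zero =>
    rw [mnLoop, satA_eq_zAll]
    have := altScan_none _ _ _ h t ht
    simp only [Sat, hiOk, not_and] at this
    have hz : zAll (List.zip res (List.zip rob tgt)) t = false := by
      by_contra hc
      exact this ht (by trivial) (by simpa using Bool.not_eq_false _ |>.mp hc)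
    simp [hz]
  | succ f ihf =>
    rw [mnLoop, satA_eq_zAll]
    have := altScan_none _ _ _ h t ht
    simp only [Sat, hiOk, not_and] at this
    have hz : zAll (List.zip res (List.zip rob tgt)) t = false := by
      by_contra hc
      exact this ht (by trivial) (by simpa using Bool.not_eq_false _ |>.mp hc)
    simp only [hz, Bool.false_eq_true, if_false]
    by_cases h30 : t + 1 ≥ 30
    · simp [h30]
    · simp only [h30, if_false]
      rw [pvAdd_eq_zipWith, zipWith_step]
      exact ihf (t + 1) (by omega) (by omega)

-- the loop, when the satisfied times are exactly the interval [lo, hi]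
lemma loop_some (res rob tgt : List Int) (lo : Int) (hi : Option Int)
    (h : altScan (List.zip res (List.zip rob tgt)) 1 none = some (lo, hi))
    (fuel : Nat) (t : Int) (ht : 1 ≤ t) (ht29 : t ≤ 29) (hft : t + fuel = 30) :
    mnLoop rob tgt fuel (List.zipWith (fun a b => a + t * b) res rob) t =
      if max lo t ≤ 29 ∧ hiOk hi (max lo t) = true then some (max lo t) else none := by
  induction fuel generalizing t with
  | zero => omega
  | succ f ihf =>
    have hiff := altScan_some _ _ _ _ _ h t ht
    have hsat_iff : Sat (List.zip res (List.zip rob tgt)) 1 none t ↔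
        zAll (List.zip res (List.zip rob tgt)) t = true := by
      simp [Sat, hiOk, ht]
    have hiff' : zAll (List.zip res (List.zip rob tgt)) t = true ↔
        (lo ≤ t ∧ hiOk hi t = true) := hsat_iff.symm.trans hiff
    rw [mnLoop, satA_eq_zAll]
    by_cases hsat : zAll (List.zip res (List.zip rob tgt)) t = true
    · obtain ⟨hlo, hhi⟩ := hiff'.mp hsat
      have hm : max lo t = t := by omega
      simp [hsat, hm, ht29, hhi]
    · have hns : ¬ (lo ≤ t ∧ hiOk hi t = true) := fun hp => hsat (hiff'.mpr hp)
      simp only [hsat, if_false, Bool.false_eq_true]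
      by_cases h30 : t + 1 ≥ 30
      · -- t = 29, the loop gives up
        have ht' : t = 29 := by omega
        subst ht'
        have hcond : ¬ (max lo 29 ≤ 29 ∧ hiOk hi (max lo 29) = true) := by
          rintro ⟨hle, hh⟩
          have hlo29 : lo ≤ 29 := by omega
          have hm : max lo 29 = 29 := by omega
          rw [hm] at hh
          exact hns ⟨hlo29, hh⟩
        rw [if_pos h30, if_neg hcond]
      · simp only [h30, if_false]
        rw [pvAdd_eq_zipWith, zipWith_step]
        rw [ihf (t + 1) (by omega) (by omega) (by omega)]
        rcases not_and_or.mp hns with hlo | hhi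
        · have hm : max lo (t + 1) = max lo t := by omega
          rw [hm]
        · -- hi = some v with v < t : both sides none
          cases hi with
          | none => simp [hiOk] at hhi
          | some v =>
            simp only [hiOk, decide_eq_true_eq] at hhi
            rw [not_le] at hhi
            have h1 : ¬ (max lo (t + 1) ≤ 29 ∧ hiOk (some v) (max lo (t + 1)) = true) := by
              rintro ⟨_, hh⟩
              simp only [hiOk, decide_eq_true_eq] at hh
              omega
            have h2 : ¬ (max lo t ≤ 29 ∧ hiOk (some v) (max lo t) = true) := by
              rintro ⟨_, hh⟩
              simp only [hiOk, decide_eq_true_eq] at hh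
              omega
            rw [if_neg h1, if_neg h2]

-- ===== VERDICT (by name: the statement is the Claim_ definition above) =====
theorem minutes_needed_spec : Claim_equal_minutes_needed := by
  intro res rob tgt _
  unfold Spec_minutes_needed minutes_needed minutes_needed_alt
  rw [mnLoop, ← cond0_eq]
  by_cases h0 : pvIsPositive (pvAdd res tgt) = true
  · simp [h0]
  · simp only [h0, Bool.false_eq_true, if_false]
    norm_num
    rw [pvAdd_eq_zipWith, zipWith_one]
    rcases hsc : altScan (List.zip res (List.zip rob tgt)) 1 none with _ | ⟨lo, hi⟩
    · rw [loop_none res rob tgt hsc 29 1 (by omega) (by omega)]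
    · rw [loop_some res rob tgt lo hi hsc 29 1 (by omega) (by omega) (by omega)]
      have hlo1 : 1 ≤ lo := altScan_mono _ _ _ _ _ hsc
      have hm : max lo 1 = lo := by omega
      rw [hm]
      have : (lo ≤ 29 ∧ hiOk hi lo = true) ↔ (lo < 30 ∧ hiOk hi lo = true) := by
        constructor <;> rintro ⟨a, b⟩ <;> exact ⟨by omega, b⟩
      rw [if_congr this rfl rfl]
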